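-- pv_equiv track=rewrite | github.com/chardmeier/annotation-inconsistency | scripts/src_links.py | filter_chains
-- ===== SOURCE A (Python) =====
-- import copy
--
-- def filter_chains(dict_chains, dict_info):
--
--     filtered = copy.deepcopy(dict_chains)
--     for chain in dict_info:
--         #emtpys are chains not types
--         if chain == "empty":
--             if chain in filtered:
--                 del filtered[chain]
--         else:
--             for mention in dict_info[chain]:
--                 m_type = mention[0]
--                 if m_type in ["vp", "clause", None, "empty"]:
--                     if chain in filtered:
--                         del filtered[chain]
--     return filtered
-- ===== SOURCE B (Python) =====
-- import copy
--
-- def filter_chains(dict_chains, dict_info):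
--     # Iterate over dict_chains and decide each key by a direct lookup into
--     # dict_info, instead of scanning dict_info and deleting from a copy.
--     def keep(chain):
--         mentions = dict_info.get(chain)
--         if mentions is None:
--             return True
--         if chain == "empty":
--             return False
--         return all(m[0] not in ("vp", "clause", None, "empty") for m in mentions)
--     return {k: copy.deepcopy(v) for k, v in dict_chains.items() if keep(k)}
-- ===== Notes on version B (the rewrite author's own statement) =====
-- stated objective: simpler
-- what changed: B inverts the traversal: it makes one pass over dict_chains and decides each key by a direct dict_info.get lookup (keep unless the key is 'empty' or has a bad-typed mention), instead of A's scan over dict_info that deletes keys from a deep copy; no deletion, no removal set, and mentions of chains absent from dict_chains are never scanned.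
import Mathlib
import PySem

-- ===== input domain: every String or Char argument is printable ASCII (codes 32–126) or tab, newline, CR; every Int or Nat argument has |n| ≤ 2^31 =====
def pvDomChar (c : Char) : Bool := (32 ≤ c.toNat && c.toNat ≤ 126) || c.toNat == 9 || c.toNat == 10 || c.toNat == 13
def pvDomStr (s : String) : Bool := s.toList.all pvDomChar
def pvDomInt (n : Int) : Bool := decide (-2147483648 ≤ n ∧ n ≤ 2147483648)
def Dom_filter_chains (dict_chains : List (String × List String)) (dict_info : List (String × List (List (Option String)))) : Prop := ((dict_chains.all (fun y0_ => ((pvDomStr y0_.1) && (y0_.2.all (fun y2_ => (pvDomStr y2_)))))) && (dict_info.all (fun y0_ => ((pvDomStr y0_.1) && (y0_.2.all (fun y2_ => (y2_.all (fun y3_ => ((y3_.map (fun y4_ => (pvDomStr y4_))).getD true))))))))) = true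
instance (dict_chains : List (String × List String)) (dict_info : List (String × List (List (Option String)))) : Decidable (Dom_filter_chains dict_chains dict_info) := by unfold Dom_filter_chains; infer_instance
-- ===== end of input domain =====

-- B inverts A's traversal: one pass over dict_chains with a per-key dict_info lookup, instead of
-- A's deepcopy-then-delete scan over dict_info (objective: simpler).  Return-value equivalence
-- only: neither implementation mutates its arguments.

-- ===== PORT A =====
def filter_chains (dict_chains : List (String × List String)) (dict_info : List (String × List (List (Option String)))) : List (String × List String) :=
  (dict_info.foldl
    (fun filtered entry =>
      let chain := entry.1
      if chain == "empty" then
        if PySem.Dict.contains filtered chain then PySem.Dict.erase filtered chain else filtered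
      else
        ((PySem.Dict.get? (PySem.Dict.mk dict_info) chain).getD []).foldl
          (fun filtered mention =>
            -- mention[0]: IndexError on an empty mention is excluded by Pre_
            let m_type := (PySem.List.pyGet? mention 0).getD none
            if [some "vp", some "clause", none, some "empty"].contains m_type then
              if PySem.Dict.contains filtered chain then PySem.Dict.erase filtered chain
              else filtered
            else filtered)
          filtered)
    (PySem.Dict.mk dict_chains)).items

-- ===== PORT B =====
-- Source B's `keep(chain)`: look chain up in dict_info and test its mentions
def fcKeep (dict_info : List (String × List (List (Option String)))) (chain : String) : Bool :=
  match PySem.Dict.get? (PySem.Dict.mk dict_info) chain with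
  | none => true
  | some mentions =>
    if chain == "empty" then false
    else mentions.all (fun m =>
      !([some "vp", some "clause", none, some "empty"].contains ((PySem.List.pyGet? m 0).getD none)))

def filter_chains_alt (dict_chains : List (String × List String)) (dict_info : List (String × List (List (Option String)))) : List (String × List String) :=
  dict_chains.filter (fun p => fcKeep dict_info p.1)

-- ===== PRECONDITION & SPEC =====
-- Pre_ excludes (a) association lists whose dict_info keys repeat — they correspond to no Python
-- dict, the Python arguments being dicts with necessarily unique keys — and (b) inputs where a
-- chain with key ≠ "empty" has an empty mention list, on which Python A raises IndexError.
def Pre_filter_chains (dict_chains : List (String × List String)) (dict_info : List (String × List (List (Option String)))) : Prop :=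
  (dict_info.map Prod.fst).Nodup ∧
  ∀ p ∈ dict_info, p.1 ≠ "empty" → ∀ m ∈ p.2, m ≠ []
instance (dict_chains : List (String × List String)) (dict_info : List (String × List (List (Option String)))) : Decidable (Pre_filter_chains dict_chains dict_info) := by unfold Pre_filter_chains; infer_instance

def pvWitness_filter_chains : (List (String × List String)) × (List (String × List (List (Option String)))) :=
  ([("a", ["x"]), ("b", [])], [("a", [[some "np", some "z"]]), ("empty", [[some "x"]]), ("c", [[none]])])

def Spec_filter_chains (dict_chains : List (String × List String)) (dict_info : List (String × List (List (Option String)))) (out : List (String × List String)) : Prop := out = filter_chains_alt dict_chains dict_info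
instance (dict_chains : List (String × List String)) (dict_info : List (String × List (List (Option String)))) (out : List (String × List String)) : Decidable (Spec_filter_chains dict_chains dict_info out) := by unfold Spec_filter_chains; infer_instance

-- ===== CLAIM (what is proved, stated in full; the proofs are below) =====
def Claim_equal_filter_chains : Prop := ∀ (dict_chains : List (String × List String)) (dict_info : List (String × List (List (Option String)))), Dom_filter_chains dict_chains dict_info → Pre_filter_chains dict_chains dict_info → Spec_filter_chains dict_chains dict_info (filter_chains dict_chains dict_info)

-- ===== LEMMAS AND PROOFS =====

-- the "bad mention" test both programs make, as one predicate
def fcBad (m : List (Option String)) : Bool :=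
  [some "vp", some "clause", none, some "empty"].contains ((PySem.List.pyGet? m 0).getD none)

-- "if chain in filtered: del filtered[chain]"
def fcDelK (k : String) (d : PySem.Dict String (List String)) : PySem.Dict String (List String) :=
  if PySem.Dict.contains d k then PySem.Dict.erase d k else d

-- one outer-loop step of A, after the inner loop has been collapsed
def fcStep (d : PySem.Dict String (List String)) (e : String × List (List (Option String))) : PySem.Dict String (List String) :=
  if e.1 == "empty" || e.2.any fcBad then fcDelK e.1 d else d

lemma fcDelK_eq (k : String) (d : PySem.Dict String (List String)) :
    fcDelK k d = PySem.Dict.mk (d.items.filter (fun p => !(p.1 == k))) := by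
  unfold fcDelK PySem.Dict.contains PySem.Dict.erase
  split
  · rfl
  · rename_i h
    have h' : ∀ p ∈ d.items, (!(p.1 == k)) = true := by
      intro p hp
      by_contra hc
      exact h (List.any_eq_true.mpr ⟨p, hp, by revert hc; cases (p.1 == k) <;> simp⟩)
    cases d with
    | mk items =>
      congr 1
      exact (List.filter_eq_self.mpr h').symm

lemma fc_inner (k : String) (ms : List (List (Option String))) (d : PySem.Dict String (List String)) :
    ms.foldl (fun d m => if fcBad m then fcDelK k d else d) d
      = if ms.any fcBad then fcDelK k d else d := by
  induction ms generalizing d with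
  | nil => simp
  | cons m ms ih =>
    by_cases hm : fcBad m
    · have hidem : fcDelK k (fcDelK k d) = fcDelK k d := by
        rw [fcDelK_eq, fcDelK_eq]
        cases d with
        | mk items => simp [List.filter_filter]
      simp [hm, List.foldl_cons, ih, hidem]
    · simp [hm, List.foldl_cons, ih]

-- the key per-entry removal condition
def fcRem (e : String × List (List (Option String))) : Bool :=
  e.1 == "empty" || e.2.any fcBad

-- A's whole fold, characterised as a filter of dict_chains by "no dict_info entry with this key
-- satisfies fcRem"
lemma fc_main (dc : List (String × List String)) (l : List (String × List (List (Option String)))) :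
    (l.foldl fcStep (PySem.Dict.mk dc)).items
      = dc.filter (fun p => !(l.any (fun e => (e.1 == p.1) && fcRem e))) := by
  induction l generalizing dc with
  | nil => simp
  | cons e l ih =>
    by_cases hc : fcRem e
    · have hstate : fcStep (PySem.Dict.mk dc) e
          = PySem.Dict.mk (dc.filter (fun p => !(p.1 == e.1))) := by
        rw [fcStep, if_pos (by simpa [fcRem] using hc), fcDelK_eq]
      rw [List.foldl_cons, hstate, ih, List.filter_filter]
      apply List.filter_congr
      intro p _
      simp only [List.any_cons, hc, Bool.and_true]
      cases h1 : (e.1 == p.1) <;> cases h2 : (p.1 == e.1) <;>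
        simp_all [BEq.comm]
    · have hstate : fcStep (PySem.Dict.mk dc) e = PySem.Dict.mk dc := by
        rw [fcStep, if_neg (by simpa [fcRem] using hc)]
      rw [List.foldl_cons, hstate, ih]
      apply List.filter_congr
      intro p _
      simp only [List.any_cons]
      have : ((e.1 == p.1) && fcRem e) = false := by
        rw [Bool.eq_false_iff.mpr hc, Bool.and_false]
      rw [this, Bool.false_or]

-- For entries of dict_info (keys nodup), A's literal outer step is fcStep
lemma fc_step_congr (dict_info : List (String × List (List (Option String))))
    (hn : (dict_info.map Prod.fst).Nodup)
    (d : PySem.Dict String (List String)) (e : String × List (List (Option String))) (he : e ∈ dict_info) :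
    (if e.1 == "empty" then
        if PySem.Dict.contains d e.1 then PySem.Dict.erase d e.1 else d
      else
        ((PySem.Dict.get? (PySem.Dict.mk dict_info) e.1).getD []).foldl
          (fun filtered mention =>
            let m_type := (PySem.List.pyGet? mention 0).getD none
            if [some "vp", some "clause", none, some "empty"].contains m_type then
              if PySem.Dict.contains filtered e.1 then PySem.Dict.erase filtered e.1
              else filtered
            else filtered)
          d)
      = fcStep d e := by
  by_cases hk : (e.1 == "empty") = true
  · rw [fcStep, if_pos (show (e.1 == "empty" || e.2.any fcBad) = true by simp [hk]), if_pos hk]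
    unfold fcDelK
    rfl
  · have hget : PySem.Dict.get? (PySem.Dict.mk dict_info) e.1 = some e.2 := by
      apply PySem.Dict.get?_of_mem_items (d := PySem.Dict.mk dict_info) (k := e.1) (v := e.2)
      · simpa [PySem.Dict.items] using he
      · simpa [PySem.Dict.keys] using hn
    rw [if_neg hk, hget]
    simp only [Option.getD_some]
    have : (fun (filtered : PySem.Dict String (List String)) (mention : List (Option String)) =>
        let m_type := (PySem.List.pyGet? mention 0).getD none
        if [some "vp", some "clause", none, some "empty"].contains m_type then
          if PySem.Dict.contains filtered e.1 then PySem.Dict.erase filtered e.1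
          else filtered
        else filtered)
        = (fun d m => if fcBad m then fcDelK e.1 d else d) := by
      funext d' m
      simp only [fcBad, fcDelK]
    rw [this, fc_inner, fcStep]
    simp [hk]

-- B's per-key decision agrees with A's removal condition, for nodup dict_info keys
lemma fc_keep_eq (dict_info : List (String × List (List (Option String))))
    (hn : (dict_info.map Prod.fst).Nodup) (k : String) :
    fcKeep dict_info k = !(dict_info.any (fun e => (e.1 == k) && fcRem e)) := by
  induction dict_info with
  | nil => simp [fcKeep, PySem.Dict.get?]
  | cons e rest ih =>
    have hn' : (rest.map Prod.fst).Nodup := (List.nodup_cons.mp hn).2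
    have hne : e.1 ∉ rest.map Prod.fst := (List.nodup_cons.mp hn).1
    by_cases hek : (e.1 == k) = true
    · have hk : e.1 = k := by simpa using hek
      have hget : PySem.Dict.get? (PySem.Dict.mk (e :: rest)) k = some e.2 := by
        rw [PySem.Dict.get?_mk_cons, if_pos hek]
      have hrest : rest.any (fun e' => (e'.1 == k) && fcRem e') = false := by
        rw [List.any_eq_false]
        intro e' he'
        have hne' : e'.1 ≠ k := fun hc => hne (by rw [hk, ← hc]; exact List.mem_map_of_mem he')
        simp [hne']
      have hall : e.2.all (fun m =>
          !([some "vp", some "clause", none, some "empty"].contains ((PySem.List.pyGet? m 0).getD none)))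
          = !(e.2.any fcBad) := by
        rw [List.all_eq_not_any_not]
        congr 1
        exact List.any_congr rfl (fun m => by simp [fcBad])
      rw [fcKeep, hget, List.any_cons, hrest, Bool.or_false, hek, Bool.true_and]
      dsimp only
      unfold fcRem
      by_cases hke : (k == "empty") = true
      · have he1 : (e.1 == "empty") = true := by rw [hk]; exact hke
        simp [hke, he1]
      · have he1 : (e.1 == "empty") = false := by rw [hk]; exact Bool.eq_false_iff.mpr hke
        rw [if_neg hke, he1, Bool.false_or, hall]
    · have hget : PySem.Dict.get? (PySem.Dict.mk (e :: rest)) k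
          = PySem.Dict.get? (PySem.Dict.mk rest) k := by
        rw [PySem.Dict.get?_mk_cons, if_neg hek]
      have : fcKeep (e :: rest) k = fcKeep rest k := by
        unfold fcKeep
        rw [hget]
      rw [this, ih hn']
      simp [List.any_cons, hek]

-- ===== VERDICT (by name: the statement is the Claim_ definition above) =====
theorem filter_chains_spec : Claim_equal_filter_chains := by
  intro dict_chains dict_info _ hpre
  obtain ⟨hn, -⟩ := hpre
  have hA : filter_chains dict_chains dict_info
      = (dict_info.foldl fcStep (PySem.Dict.mk dict_chains)).items := by
    unfold filter_chains
    congr 1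
    exact PySem.List.foldl_congr_mem _ _ _ _ (fun d e he => fc_step_congr dict_info hn d e he)
  unfold Spec_filter_chains filter_chains_alt
  rw [hA, fc_main]
  apply List.filter_congr
  intro p _
  rw [fc_keep_eq dict_info hn p.1]
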